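-- pv_equiv track=rewrite | github.com/aneesh-iyer29/codesheetreader | codesheetreader.py | aristo_format_sentence
-- ===== SOURCE A (Python) =====
-- def aristo_format_sentence(s):
--     words = s.split()
--     formatted_string = ""
--     current_line = ""
--     total_length = 0
--     lines = 1
--     for word in words:
--         if total_length + len(word) + 1 > 52:
--             formatted_string += current_line.rstrip() + "\n\n\n"
--             current_line = word + " "
--             total_length = len(word) + 1
--             lines +=1
--         else:
--             current_line += word + " "
--             total_length += len(word) + 1
--     formatted_string += current_line.rstrip()
--     formatted_string += "\n"
--     return formatted_string
-- ===== SOURCE B (Python) =====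
-- def aristo_format_sentence(s):
--     # Recursive line-at-a-time decomposition: each line takes the longest
--     # fitting prefix of the remaining words, then the rest is wrapped recursively.
--     words = s.split()
--
--     def fill(ws, used):
--         # longest prefix of ws whose cumulative (len(word)+1) stays within 52
--         if ws and used + len(ws[0]) + 1 <= 52:
--             taken, rest = fill(ws[1:], used + len(ws[0]) + 1)
--             return [ws[0]] + taken, rest
--         return [], ws
--
--     def wrap(ws):
--         # ws nonempty: the line is seeded with its break word, then filled
--         taken, rest = fill(ws[1:], len(ws[0]) + 1)
--         line = " ".join([ws[0]] + taken)
--         return line if not rest else line + "\n\n\n" + wrap(rest)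
--
--     first, rest = fill(words, 0)
--     body = " ".join(first) if not rest else " ".join(first) + "\n\n\n" + wrap(rest)
--     return body + "\n"
-- ===== Notes on version B (the rewrite author's own statement) =====
-- stated objective: alternative
-- what changed: B replaces A's single imperative pass with mutable string/length accumulators by a recursive line-at-a-time decomposition: a recursive fill extracts the longest fitting prefix of the remaining words for each line and wrap recurses on the rest, rendering each line with join instead of concatenation plus rstrip.
import Mathlib
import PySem

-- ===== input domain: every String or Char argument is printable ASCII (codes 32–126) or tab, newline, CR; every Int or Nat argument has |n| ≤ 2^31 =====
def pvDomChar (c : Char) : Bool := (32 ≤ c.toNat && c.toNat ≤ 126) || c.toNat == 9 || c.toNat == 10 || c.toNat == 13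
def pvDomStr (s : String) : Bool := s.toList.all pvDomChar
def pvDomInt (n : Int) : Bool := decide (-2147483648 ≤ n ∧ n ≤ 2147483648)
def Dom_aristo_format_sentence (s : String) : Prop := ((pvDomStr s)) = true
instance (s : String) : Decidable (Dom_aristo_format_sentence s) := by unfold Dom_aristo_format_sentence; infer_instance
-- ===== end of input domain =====

-- B is an alternative decomposition: recursive line-at-a-time wrapping (fill the longest
-- fitting prefix per line, recurse on the rest) instead of A's single accumulator loop.

-- ===== PORT A =====
-- state: (formatted_string, current_line, total_length); the unused Python counter `lines` is omitted
def aristo_format_sentence (s : String) : String :=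
  let words := PySem.Chars.split₀ s.toList
  let res := words.foldl
    (fun (st : List Char × List Char × Int) word =>
      if st.2.2 + (word.length : Int) + 1 > 52 then
        (st.1 ++ PySem.Chars.rstrip st.2.1 ++ ['\n', '\n', '\n'], word ++ [' '], (word.length : Int) + 1)
      else
        (st.1, st.2.1 ++ word ++ [' '], st.2.2 + (word.length : Int) + 1))
    ([], [], 0)
  String.ofList (res.1 ++ PySem.Chars.rstrip res.2.1 ++ ['\n'])

-- ===== PORT B =====
-- fill(ws, used): longest prefix of ws whose cumulative (len+1) stays within 52, plus the rest
def pvFill : List (List Char) → Int → List (List Char) × List (List Char)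
  | [], _ => ([], [])
  | w :: ws, used =>
    if used + (w.length : Int) + 1 ≤ 52 then
      let r := pvFill ws (used + (w.length : Int) + 1)
      (w :: r.1, r.2)
    else ([], w :: ws)

theorem pvFill_snd_length (ws : List (List Char)) (u : Int) :
    (pvFill ws u).2.length ≤ ws.length := by
  induction ws generalizing u with
  | nil => simp [pvFill]
  | cons w ws ih =>
    simp only [pvFill]
    split
    · exact le_trans (ih _) (by simp)
    · simp

-- wrap(ws): ws nonempty in Python (the [] case is unreachable there, kept only for totality)
def pvWrap : List (List Char) → List Char
  | [] => []
  | w :: ws =>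
    let r := pvFill ws ((w.length : Int) + 1)
    let line := PySem.Chars.join [' '] (w :: r.1)
    if r.2 = [] then line else line ++ ['\n', '\n', '\n'] ++ pvWrap r.2
termination_by ws => ws.length
decreasing_by
  simpa using Nat.lt_succ_of_le (pvFill_snd_length ws ((w.length : Int) + 1))

def aristo_format_sentence_alt (s : String) : String :=
  let words := PySem.Chars.split₀ s.toList
  let fr := pvFill words 0
  let body :=
    if fr.2 = [] then PySem.Chars.join [' '] fr.1
    else PySem.Chars.join [' '] fr.1 ++ ['\n', '\n', '\n'] ++ pvWrap fr.2
  String.ofList (body ++ ['\n'])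

-- ===== PRECONDITION & SPEC =====
def Spec_aristo_format_sentence (s : String) (out : String) : Prop := out = aristo_format_sentence_alt s
instance (s : String) (out : String) : Decidable (Spec_aristo_format_sentence s out) := by unfold Spec_aristo_format_sentence; infer_instance

-- ===== CLAIM (what is proved, stated in full; the proofs are below) =====
def Claim_equal_aristo_format_sentence : Prop := ∀ (s : String), Dom_aristo_format_sentence s → Spec_aristo_format_sentence s (aristo_format_sentence s)

-- ===== LEMMAS AND PROOFS =====

-- a list of words, each nonempty and whitespace-free (what s.split() produces)
def pvWords (ws : List (List Char)) : Prop :=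
  ∀ w ∈ ws, w ≠ [] ∧ ∀ c ∈ w, PySem.Chars.isspace c = false

-- words of split₀ are nonempty and whitespace-free
theorem pvSplit0_go_words (s cur : List Char) (acc : List (List Char))
    (hcur : ∀ c ∈ cur, PySem.Chars.isspace c = false)
    (hacc : pvWords acc) :
    pvWords (PySem.Chars.split₀.go s cur acc) := by
  induction s generalizing cur acc with
  | nil =>
    simp only [PySem.Chars.split₀.go]
    split
    · intro w hw; exact hacc w (List.mem_reverse.mp hw)
    · rename_i h
      intro w hw
      rw [List.mem_reverse, List.mem_cons] at hw
      rcases hw with h1 | h2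
      · subst h1
        refine ⟨by simpa using (by simpa [List.isEmpty_iff] using h), ?_⟩
        intro c hc; exact hcur c (List.mem_reverse.mp hc)
      · exact hacc w h2
  | cons c rest ih =>
    simp only [PySem.Chars.split₀.go]
    split
    · split
      · exact ih [] acc (by simp) hacc
      · rename_i hsp hne
        refine ih [] _ (by simp) ?_
        intro w hw
        rw [List.mem_cons] at hw
        rcases hw with h1 | h2
        · subst h1
          refine ⟨by simpa using (by simpa [List.isEmpty_iff] using hne), ?_⟩
          intro d hd; exact hcur d (List.mem_reverse.mp hd)
        · exact hacc w h2
    · rename_i hsp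
      refine ih (c :: cur) acc ?_ hacc
      intro d hd
      rw [List.mem_cons] at hd
      rcases hd with h1 | h2
      · subst h1; simpa using hsp
      · exact hcur d h2

theorem pvSplit0_words (s : List Char) : pvWords (PySem.Chars.split₀ s) := by
  unfold PySem.Chars.split₀
  exact pvSplit0_go_words s [] [] (by simp) (by intro w hw; simp at hw)

-- A's current_line is the words joined with a trailing space after each
def pvFlat (ws : List (List Char)) : List Char := (ws.map (fun w => w ++ [' '])).flatten

theorem pvFlat_eq (ws : List (List Char)) (h : ws ≠ []) :
    pvFlat ws = List.intercalate [' '] ws ++ [' '] := by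
  induction ws with
  | nil => simp at h
  | cons w ws ih =>
    cases ws with
    | nil => simp [pvFlat, List.intercalate]
    | cons w2 ws' =>
      have := ih (by simp)
      simp only [pvFlat, List.map_cons, List.flatten_cons] at this ⊢
      rw [this]
      simp [List.intercalate, List.intersperse]

theorem pvLast_nonspace (ws : List (List Char)) (hne : ws ≠ []) (h : pvWords ws) :
    ∃ c t, (List.intercalate [' '] ws).reverse = c :: t ∧ PySem.Chars.isspace c = false := by
  induction ws with
  | nil => simp at hne
  | cons w ws ih =>
    cases ws with
    | nil =>
      obtain ⟨hwne, hwsp⟩ := h w (by simp)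
      obtain ⟨c, t, hct⟩ := List.exists_cons_of_ne_nil (by simpa using hwne : w.reverse ≠ [])
      exact ⟨c, t, by simpa [List.intercalate] using hct,
        hwsp c (by rw [← List.mem_reverse, hct]; simp)⟩
    | cons w2 ws' =>
      obtain ⟨c, t, hct, hc⟩ := ih (by simp) (fun v hv => h v (by simp [hv]))
      refine ⟨c, t ++ (w ++ [' ']).reverse, ?_, hc⟩
      have : List.intercalate [' '] (w :: w2 :: ws') = (w ++ [' ']) ++ List.intercalate [' '] (w2 :: ws') := by
        simp [List.intercalate, List.intersperse]
      rw [this, List.reverse_append, hct]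
      simp

theorem pvRstrip_flat (ws : List (List Char)) (h : pvWords ws) :
    PySem.Chars.rstrip (pvFlat ws) = PySem.Chars.join [' '] ws := by
  cases hne : ws with
  | nil => simp [pvFlat, PySem.Chars.rstrip, PySem.Chars.join, List.intercalate]
  | cons w ws' =>
    rw [← hne]
    have hwne : ws ≠ [] := by simp [hne]
    rw [pvFlat_eq ws hwne]
    obtain ⟨c, t, hct, hc⟩ := pvLast_nonspace ws hwne h
    unfold PySem.Chars.rstrip PySem.Chars.join
    rw [List.reverse_append, hct]
    simp only [List.reverse_cons, List.reverse_nil, List.nil_append, List.singleton_append]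
    rw [List.dropWhile_cons_of_pos (by decide), List.dropWhile_cons_of_neg (by simp [hc])]
    rw [← hct, List.reverse_reverse]

-- the main invariant: A's fold from a mid-line state renders to what fill/wrap produces
theorem pvMain (ws : List (List Char)) (pre : List Char) (curW : List (List Char)) (tl : Int)
    (hws : pvWords ws) (hcur : pvWords curW) :
    (ws.foldl
        (fun (st : List Char × List Char × Int) word =>
          if st.2.2 + (word.length : Int) + 1 > 52 then
            (st.1 ++ PySem.Chars.rstrip st.2.1 ++ ['\n', '\n', '\n'], word ++ [' '], (word.length : Int) + 1)
          else
            (st.1, st.2.1 ++ word ++ [' '], st.2.2 + (word.length : Int) + 1))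
        (pre, pvFlat curW, tl)).1 ++
      PySem.Chars.rstrip
        (ws.foldl
          (fun (st : List Char × List Char × Int) word =>
            if st.2.2 + (word.length : Int) + 1 > 52 then
              (st.1 ++ PySem.Chars.rstrip st.2.1 ++ ['\n', '\n', '\n'], word ++ [' '], (word.length : Int) + 1)
            else
              (st.1, st.2.1 ++ word ++ [' '], st.2.2 + (word.length : Int) + 1))
          (pre, pvFlat curW, tl)).2.1 ++ ['\n'] =
    pre ++ PySem.Chars.join [' '] (curW ++ (pvFill ws tl).1)
      ++ (if (pvFill ws tl).2 = [] then []
          else ['\n', '\n', '\n'] ++ pvWrap (pvFill ws tl).2)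
      ++ ['\n'] := by
  induction ws generalizing pre curW tl with
  | nil =>
    simp only [List.foldl_nil, pvFill]
    rw [pvRstrip_flat curW hcur]
    simp
  | cons w ws' ih =>
    have hw := hws w (by simp)
    have hws' : pvWords ws' := fun v hv => hws v (by simp [hv])
    simp only [List.foldl_cons]
    by_cases hcond : tl + (w.length : Int) + 1 ≤ 52
    · rw [if_neg (by omega)]
      have hflat : pvFlat curW ++ w ++ [' '] = pvFlat (curW ++ [w]) := by simp [pvFlat]
      rw [hflat]
      rw [ih pre (curW ++ [w]) _ hws'
        (by intro v hv; rw [List.mem_append] at hv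
            rcases hv with h | h
            · exact hcur v h
            · simp at h; subst h; exact hw)]
      simp only [pvFill, if_pos hcond]
      simp [List.append_assoc]
    · rw [if_pos (by omega)]
      have hw1 : w ++ [' '] = pvFlat [w] := by simp [pvFlat]
      rw [hw1]
      rw [ih _ [w] _ hws' (by intro v hv; simp at hv; subst hv; exact hw)]
      rw [pvRstrip_flat curW hcur]
      simp only [pvFill, if_neg hcond]
      simp only [if_neg (by simp : ¬ (w :: ws' = []))]
      rw [pvWrap]
      by_cases h2 : (pvFill ws' ((w.length : Int) + 1)).2 = []
      · simp [h2, List.append_assoc]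
      · simp [h2, List.append_assoc]

-- ===== VERDICT (by name: the statement is the Claim_ definition above) =====
theorem aristo_format_sentence_spec : Claim_equal_aristo_format_sentence := by
  intro s _
  unfold Spec_aristo_format_sentence
  have h := pvMain (PySem.Chars.split₀ s.toList) [] [] 0 (pvSplit0_words s.toList)
    (by intro w hw; simp at hw)
  simp only [pvFlat, List.map_nil, List.flatten_nil, List.nil_append] at h
  have h2 :
      (((PySem.Chars.split₀ s.toList).foldl
          (fun (st : List Char × List Char × Int) word =>
            if st.2.2 + (word.length : Int) + 1 > 52 then
              (st.1 ++ PySem.Chars.rstrip st.2.1 ++ ['\n', '\n', '\n'], word ++ [' '], (word.length : Int) + 1)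
            else
              (st.1, st.2.1 ++ word ++ [' '], st.2.2 + (word.length : Int) + 1))
          ([], [], 0)).1 ++
        PySem.Chars.rstrip
          (((PySem.Chars.split₀ s.toList).foldl
            (fun (st : List Char × List Char × Int) word =>
              if st.2.2 + (word.length : Int) + 1 > 52 then
                (st.1 ++ PySem.Chars.rstrip st.2.1 ++ ['\n', '\n', '\n'], word ++ [' '], (word.length : Int) + 1)
              else
                (st.1, st.2.1 ++ word ++ [' '], st.2.2 + (word.length : Int) + 1))
            ([], [], 0)).2.1) ++ ['\n']) =
      ((if (pvFill (PySem.Chars.split₀ s.toList) 0).2 = []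
        then PySem.Chars.join [' '] (pvFill (PySem.Chars.split₀ s.toList) 0).1
        else PySem.Chars.join [' '] (pvFill (PySem.Chars.split₀ s.toList) 0).1 ++ ['\n', '\n', '\n']
          ++ pvWrap (pvFill (PySem.Chars.split₀ s.toList) 0).2) ++ ['\n']) := by
    rw [h]
    by_cases hr : (pvFill (PySem.Chars.split₀ s.toList) 0).2 = []
    · simp [hr]
    · simp [hr, List.append_assoc]
  exact congrArg String.ofList h2
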